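-- pv_equiv track=rewrite | github.com/ElJoseann/ID1000500B_PatricioMorales_JoseRodriguez | driver/py/ID1000500B.py | get_convolution
-- ===== SOURCE A (Python) =====
-- def get_convolution(X):
--     sizeH = 5
--     size  = len(X)
--     H = [0x04, 0x30, 0x13, 0x0A, 0x26]
--     Z = []
--     i = 0
--     while i < (size + sizeH - 1):
--         currentZ = 0
--         j = 0
--         while j < size:
--             if (i-j) >= 0 and (i-j) < sizeH:
--                 currentZ += H[i-j] * X[j]
--             j += 1
--         Z.append(currentZ)
--         i += 1
--     return Z
-- ===== SOURCE B (Python) =====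
-- def get_convolution(X):
--     # Gather over the 5 fixed taps per output index: O(n) instead of O(n^2).
--     n = len(X)
--     def x(t):
--         return X[t] if 0 <= t < n else 0
--     return [4*x(i) + 48*x(i-1) + 19*x(i-2) + 10*x(i-3) + 38*x(i-4)
--             for i in range(n + 4)]
-- ===== Notes on version B (the rewrite author's own statement) =====
-- stated objective: faster
-- what changed: B builds each output sample from the 5 fixed kernel taps (gather with a zero-padded accessor) instead of A's inner scan over every index of X, dropping the per-output O(n) guard loop.
import Mathlib
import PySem

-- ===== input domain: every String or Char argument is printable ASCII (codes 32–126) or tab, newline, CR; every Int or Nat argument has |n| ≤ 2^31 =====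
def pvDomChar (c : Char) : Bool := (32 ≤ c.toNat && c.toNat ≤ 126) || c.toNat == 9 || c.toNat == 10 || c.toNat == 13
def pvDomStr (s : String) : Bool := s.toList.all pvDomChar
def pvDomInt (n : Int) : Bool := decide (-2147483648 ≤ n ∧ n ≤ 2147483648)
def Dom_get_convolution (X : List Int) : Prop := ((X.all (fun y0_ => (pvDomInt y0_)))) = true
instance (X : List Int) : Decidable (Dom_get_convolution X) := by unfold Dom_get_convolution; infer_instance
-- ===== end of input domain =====

-- B replaces A's scan of ALL of X per output index by the 5 fixed kernel taps per index: O(n) instead of O(n^2).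

-- ===== PORT A =====
def pvH : List Int := [0x04, 0x30, 0x13, 0x0A, 0x26]

-- A's inner while loop: j walks the indices of X (here: X itself with counter j); acc = currentZ.
-- H[i-j] is accessed only under the guard 0 ≤ i-j < 5, so pyGetD … 0 is exact there.
def pvInnerA (i : Int) (j : Int) (acc : Int) : List Int → Int
  | [] => acc
  | x :: xs =>
      pvInnerA i (j + 1)
        (if 0 ≤ i - j ∧ i - j < 5 then acc + PySem.List.pyGetD pvH (i - j) 0 * x else acc) xs

-- A's outer while loop: k = number of remaining iterations (size + sizeH - 1 total), i the counter, Z the output.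
def pvOuterA (X : List Int) : Nat → Int → List Int → List Int
  | 0, _, Z => Z
  | k + 1, i, Z => pvOuterA X k (i + 1) (Z ++ [pvInnerA i 0 0 X])

def get_convolution (X : List Int) : List Int := pvOuterA X (X.length + 4) 0 []

-- ===== PORT B =====
-- B's helper x(t): X[t] if in range else 0.
def pvAt (X : List Int) (t : Int) : Int :=
  if 0 ≤ t ∧ t < (X.length : Int) then PySem.List.pyGetD X t 0 else 0

def pvTerm (X : List Int) (i : Int) : Int :=
  4 * pvAt X i + 48 * pvAt X (i - 1) + 19 * pvAt X (i - 2) + 10 * pvAt X (i - 3) + 38 * pvAt X (i - 4)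

def get_convolution_alt (X : List Int) : List Int :=
  (PySem.List.pyRange 0 ((X.length : Int) + 4) 1).map (pvTerm X)

-- ===== PRECONDITION & SPEC =====
def Spec_get_convolution (X : List Int) (out : List Int) : Prop := out = get_convolution_alt X
instance (X : List Int) (out : List Int) : Decidable (Spec_get_convolution X out) := by unfold Spec_get_convolution; infer_instance

-- ===== CLAIM (what is proved, stated in full; the proofs are below) =====
def Claim_equal_get_convolution : Prop := ∀ (X : List Int), Dom_get_convolution X → Spec_get_convolution X (get_convolution X)

-- ===== LEMMAS AND PROOFS =====

theorem pvAt_nil (t : Int) : pvAt [] t = 0 := by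
  simp [pvAt]

theorem pvAt_neg (X : List Int) (t : Int) (h : t < 0) : pvAt X t = 0 := by
  simp [pvAt]; omega

theorem pvAt_cons (x : Int) (xs : List Int) (t : Int) :
    pvAt (x :: xs) t = if t = 0 then x else pvAt xs (t - 1) := by
  unfold pvAt
  by_cases h0 : t = 0
  . subst h0; simp
  . by_cases hpos : 0 < t
    . have h1 : (0 ≤ t ∧ t < ((x :: xs).length : Int)) ↔ (0 ≤ t - 1 ∧ t - 1 < (xs.length : Int)) := by
        simp only [List.length_cons]; push_cast; omega
      by_cases hin : 0 ≤ t - 1 ∧ t - 1 < (xs.length : Int)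
      . rw [if_pos (h1.mpr hin), if_pos hin, if_neg h0]
        rw [PySem.List.pyGetD_eq_getElem _ _ (by omega) (by simp only [List.length_cons]; push_cast; omega),
            PySem.List.pyGetD_eq_getElem _ _ (by omega) (by omega)]
        have ht : t.toNat = (t - 1).toNat + 1 := by omega
        simp only [ht, List.getElem_cons_succ]
      . rw [if_neg (fun h => hin (h1.mp h)), if_neg hin, if_neg h0]
    . have hneg : t < 0 := by omega
      rw [if_neg (by omega), if_neg h0,
          if_neg (by omega : ¬(0 ≤ t - 1 ∧ t - 1 < (xs.length : Int)))]

theorem pvTerm_nil (i : Int) : pvTerm [] i = 0 := by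
  simp [pvTerm, pvAt_nil]

theorem pvTerm_cons (x : Int) (xs : List Int) (t : Int) :
    pvTerm (x :: xs) t
      = (if 0 ≤ t ∧ t < 5 then PySem.List.pyGetD pvH t 0 * x else 0) + pvTerm xs (t - 1) := by
  simp only [pvTerm]
  rw [pvAt_cons, pvAt_cons, pvAt_cons, pvAt_cons, pvAt_cons]
  by_cases h0 : t = 0
  . subst h0
    rw [show PySem.List.pyGetD pvH 0 0 = 4 from rfl]
    norm_num [pvAt_neg]
  . by_cases h1 : t = 1
    . subst h1
      rw [show PySem.List.pyGetD pvH 1 0 = 48 from rfl]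
      norm_num [pvAt_neg]
      ring
    . by_cases h2 : t = 2
      . subst h2
        rw [show PySem.List.pyGetD pvH 2 0 = 19 from rfl]
        norm_num [pvAt_neg]
        ring
      . by_cases h3 : t = 3
        . subst h3
          rw [show PySem.List.pyGetD pvH 3 0 = 10 from rfl]
          norm_num [pvAt_neg]
          ring
        . by_cases h4 : t = 4
          . subst h4
            rw [show PySem.List.pyGetD pvH 4 0 = 38 from rfl]
            norm_num [pvAt_neg]
            ring
          . rw [if_neg (by omega : ¬(0 ≤ t ∧ t < 5))]
            rw [if_neg h0, if_neg (by omega : ¬ t - 1 = 0), if_neg (by omega : ¬ t - 2 = 0),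
                if_neg (by omega : ¬ t - 3 = 0), if_neg (by omega : ¬ t - 4 = 0)]
            ring_nf

theorem pvInnerA_eq (X : List Int) : ∀ (i j acc : Int),
    pvInnerA i j acc X = acc + pvTerm X (i - j) := by
  induction X with
  | nil => intro i j acc; simp [pvInnerA, pvTerm_nil]
  | cons x xs ih =>
      intro i j acc
      rw [pvInnerA, ih, pvTerm_cons]
      have : i - (j + 1) = i - j - 1 := by ring
      rw [this]
      by_cases h : 0 ≤ i - j ∧ i - j < 5
      · rw [if_pos h, if_pos h]; ring
      · rw [if_neg h, if_neg h]; ring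

theorem pvOuterA_eq (X : List Int) : ∀ (k : Nat) (i : Int) (Z : List Int),
    pvOuterA X k i Z = Z ++ (PySem.List.pyRange i (i + k) 1).map (pvTerm X) := by
  intro k
  induction k with
  | zero => intro i Z; simp [pvOuterA, PySem.List.pyRange_one_eq_nil]
  | succ k ih =>
      intro i Z
      rw [pvOuterA, ih]
      have hlt : i < i + ((k : Int) + 1) := by omega
      rw [show i + ((k + 1 : Nat) : Int) = i + ((k : Int) + 1) from by push_cast; ring]
      rw [PySem.List.pyRange_one_cons hlt]
      rw [show i + ((k : Int) + 1) = (i + 1) + (k : Int) from by ring]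
      simp [pvInnerA_eq, List.append_assoc]

-- ===== VERDICT (by name: the statement is the Claim_ definition above) =====
theorem get_convolution_spec : Claim_equal_get_convolution := by
  intro X _
  unfold Spec_get_convolution get_convolution get_convolution_alt
  rw [pvOuterA_eq]
  simp
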